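-- pv_equiv track=rewrite | github.com/HuyaneMatsu/hata | hata/discord/bases/flags/flag_meta.py | _filter_shifts_by_name
-- ===== SOURCE A (Python) =====
-- def _filter_shifts_by_name(accumulated_shifts, duplicates):
--     """
--     Filters the shifts for the given names.
--
--     Parameters
--     ----------
--     accumulated_shifts : `set<(str, int, None | FlagDeprecation)>`
--         The accumulated shifts by their name.
--
--     duplicates : `set<str>`
--         Duplicated names.
--
--     Returns
--     -------
--     shifts_by_name : `dict<str, set<int>>`
--     """
--     shifts_by_name = {name: set() for name in duplicates}
--
--     for name, shift, deprecation in accumulated_shifts: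
--         try:
--             shifts = shifts_by_name[name]
--         except KeyError:
--             continue
--
--         shifts.add(shift)
--
--     return shifts_by_name
-- ===== SOURCE B (Python) =====
-- def _filter_shifts_by_name(accumulated_shifts, duplicates):
--     # Per-name scan: for each requested name, filter the shifts directly.
--     # No grouping index, no mutation; O(n*m) nested comprehension.
--     return {
--         name: {shift for n, shift, deprecation in accumulated_shifts if n == name}
--         for name in duplicates
--     }
-- ===== Notes on version B (the rewrite author's own statement) =====
-- stated objective: alternative
-- what changed: A builds a mutable dict seeded with the duplicate names and fills it in a single pass over the shifts; B has no grouping pass at all: a purely functional nested comprehension that, for each duplicate name, re-scans accumulated_shifts and collects exactly that name's shifts (O(n*m) per-name filtering instead of O(n+m) dict mutation).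
import Mathlib
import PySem

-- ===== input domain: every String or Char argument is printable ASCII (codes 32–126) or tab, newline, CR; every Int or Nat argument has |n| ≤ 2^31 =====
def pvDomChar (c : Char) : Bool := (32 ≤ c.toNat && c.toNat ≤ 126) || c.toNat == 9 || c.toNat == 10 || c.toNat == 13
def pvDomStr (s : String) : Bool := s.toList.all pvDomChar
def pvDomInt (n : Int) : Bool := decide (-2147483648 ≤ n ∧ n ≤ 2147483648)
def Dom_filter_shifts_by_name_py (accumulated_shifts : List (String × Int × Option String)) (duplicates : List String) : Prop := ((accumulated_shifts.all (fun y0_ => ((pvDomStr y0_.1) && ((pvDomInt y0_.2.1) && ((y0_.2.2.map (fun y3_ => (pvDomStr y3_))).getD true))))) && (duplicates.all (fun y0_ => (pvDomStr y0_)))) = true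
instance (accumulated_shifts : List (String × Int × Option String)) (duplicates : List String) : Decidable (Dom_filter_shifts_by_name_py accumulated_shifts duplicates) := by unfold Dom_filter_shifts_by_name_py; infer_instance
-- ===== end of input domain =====

-- B replaces A's mutable pre-seeded dict + single filling pass by a purely functional
-- nested comprehension: per duplicate name, re-scan the shifts and collect that name's shifts.

-- ===== PORT A =====
-- shifts_by_name = {name: set() for name in duplicates};
-- for name, shift, deprecation in accumulated_shifts: try shifts = shifts_by_name[name]
-- except KeyError: continue; shifts.add(shift); return shifts_by_name
def filter_shifts_by_name_py (accumulated_shifts : List (String × Int × Option String)) (duplicates : List String) : List (String × List Int) :=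
  let init : PySem.Dict String (PySem.Set Int) :=
    duplicates.foldl (fun d name => d.insert name PySem.Set.empty) PySem.Dict.empty
  let final : PySem.Dict String (PySem.Set Int) :=
    accumulated_shifts.foldl
      (fun d t => if d.contains t.1 then d.modify t.1 PySem.Set.empty (fun s => PySem.Set.add s t.2.1) else d)
      init
  final.items

-- ===== PORT B =====
-- return {name: {shift for n, shift, deprecation in accumulated_shifts if n == name}
--         for name in duplicates}
-- the inner set comprehension = Set.ofList of the filtered shifts of that name
def filter_shifts_by_name_py_alt (accumulated_shifts : List (String × Int × Option String)) (duplicates : List String) : List (String × List Int) :=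
  (duplicates.foldl
    (fun r name =>
      r.insert name
        (PySem.Set.ofList ((accumulated_shifts.filter (fun t => t.1 == name)).map (fun t => t.2.1))))
    PySem.Dict.empty).items

-- ===== PRECONDITION & SPEC =====
def Spec_filter_shifts_by_name_py (accumulated_shifts : List (String × Int × Option String)) (duplicates : List String) (out : List (String × List Int)) : Prop := out = filter_shifts_by_name_py_alt accumulated_shifts duplicates
instance (accumulated_shifts : List (String × Int × Option String)) (duplicates : List String) (out : List (String × List Int)) : Decidable (Spec_filter_shifts_by_name_py accumulated_shifts duplicates out) := by unfold Spec_filter_shifts_by_name_py; infer_instance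

-- ===== CLAIM =====
def Claim_equal_filter_shifts_by_name_py : Prop := ∀ (accumulated_shifts : List (String × Int × Option String)) (duplicates : List String), Dom_filter_shifts_by_name_py accumulated_shifts duplicates → Spec_filter_shifts_by_name_py accumulated_shifts duplicates (filter_shifts_by_name_py accumulated_shifts duplicates)

-- ===== LEMMAS AND PROOFS =====

-- A's loop never inserts or erases keys
theorem pv_keysA (acc : List (String × Int × Option String)) (d : PySem.Dict String (PySem.Set Int)) :
    (acc.foldl (fun d t => if d.contains t.1 then d.modify t.1 PySem.Set.empty (fun s => PySem.Set.add s t.2.1) else d) d).keys = d.keys := by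
  induction acc generalizing d with
  | nil => rfl
  | cons t acc ih =>
    simp only [List.foldl_cons]
    by_cases h : d.contains t.1
    · rw [ih, if_pos h, PySem.Dict.keys_modify, PySem.Dict.keys_insert_of_contains _ _ h]
    · rw [ih, if_neg h]

-- A's loop: value at a contained key k collects exactly the shifts whose name is k
theorem pv_valA (acc : List (String × Int × Option String)) (d : PySem.Dict String (PySem.Set Int)) (k : String)
    (hk : d.contains k = true) :
    (acc.foldl (fun d t => if d.contains t.1 then d.modify t.1 PySem.Set.empty (fun s => PySem.Set.add s t.2.1) else d) d).getD k PySem.Set.empty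
      = PySem.Set.update (d.getD k PySem.Set.empty) ((acc.filter (fun t => t.1 == k)).map (fun t => t.2.1)) := by
  induction acc generalizing d with
  | nil => simp [PySem.Set.update_nil]
  | cons t acc ih =>
    simp only [List.foldl_cons, List.filter_cons]
    by_cases ht : t.1 = k
    · subst ht
      have hc : d.contains t.1 = true := hk
      rw [if_pos hc]
      have hk' : (d.modify t.1 PySem.Set.empty (fun s => PySem.Set.add s t.2.1)).contains t.1 = true := by
        simp [PySem.Dict.contains_modify, hk]
      rw [ih _ hk', PySem.Dict.getD_modify_self]
      simp [PySem.Set.update_cons]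
    · have hne : (t.1 == k) = false := by simp [ht]
      rw [hne]
      by_cases hc : d.contains t.1
      · have hk' : (d.modify t.1 PySem.Set.empty (fun s => PySem.Set.add s t.2.1)).contains k = true := by
          simp [PySem.Dict.contains_modify, hk]
        rw [if_pos hc, ih _ hk', PySem.Dict.getD_modify_of_ne _ _ _ (fun h => ht h.symm)]
        simp
      · rw [if_neg hc, ih _ hk]
        simp

-- an insert loop whose value depends only on the key: final lookup
theorem pv_getD_insert_loop (f : String → PySem.Set Int) (l : List String)
    (r : PySem.Dict String (PySem.Set Int)) (k : String) :
    (l.foldl (fun r n => r.insert n (f n)) r).getD k PySem.Set.empty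
      = if k ∈ l then f k else r.getD k PySem.Set.empty := by
  induction l generalizing r with
  | nil => simp
  | cons x l ih =>
    simp only [List.foldl_cons, ih, PySem.Dict.getD_insert, List.mem_cons]
    by_cases hl : k ∈ l
    · simp [hl]
    · by_cases hx : k = x <;> simp [hl, hx]

-- ===== VERDICT =====
theorem filter_shifts_by_name_py_spec : Claim_equal_filter_shifts_by_name_py := by
  intro acc dups _
  unfold Spec_filter_shifts_by_name_py filter_shifts_by_name_py filter_shifts_by_name_py_alt
  simp only []
  set init : PySem.Dict String (PySem.Set Int) :=
    dups.foldl (fun d name => d.insert name PySem.Set.empty) PySem.Dict.empty with hinit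
  set finalA : PySem.Dict String (PySem.Set Int) :=
    acc.foldl (fun d t => if d.contains t.1 then d.modify t.1 PySem.Set.empty (fun s => PySem.Set.add s t.2.1) else d) init with hfinal
  set resB : PySem.Dict String (PySem.Set Int) :=
    dups.foldl
      (fun r name =>
        r.insert name (PySem.Set.ofList ((acc.filter (fun t => t.1 == name)).map (fun t => t.2.1))))
      PySem.Dict.empty with hres
  have hkeys_init : init.keys = PySem.Set.ofList dups := by
    rw [hinit, PySem.Dict.keys_foldl_insert, PySem.Dict.keys_empty, PySem.Set.update_nil_left]
  have hkeysA : finalA.keys = PySem.Set.ofList dups := by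
    rw [hfinal, pv_keysA, hkeys_init]
  have hkeysB : resB.keys = PySem.Set.ofList dups := by
    rw [hres, PySem.Dict.keys_foldl_insert, PySem.Dict.keys_empty, PySem.Set.update_nil_left]
  have hndA : finalA.keys.Nodup := by rw [hkeysA]; exact PySem.Set.nodup_ofList _
  have hndB : resB.keys.Nodup := by rw [hkeysB]; exact PySem.Set.nodup_ofList _
  rw [PySem.Dict.items_eq_map_keys finalA hndA PySem.Set.empty,
    PySem.Dict.items_eq_map_keys resB hndB PySem.Set.empty, hkeysA, hkeysB]
  apply List.map_congr_left
  intro k hkmem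
  have hkd : k ∈ dups := (PySem.Set.mem_ofList _ _).1 hkmem
  have hcontA : init.contains k = true := by
    rw [(PySem.Dict.contains_iff_mem_keys _ _).2 (by rw [hkeys_init]; exact (PySem.Set.mem_ofList _ _).2 hkd)]
  have hinitD : init.getD k PySem.Set.empty = PySem.Set.empty := by
    rw [hinit, pv_getD_insert_loop (fun _ => PySem.Set.empty)]
    simp [PySem.Dict.getD_empty]
  have hA : finalA.getD k PySem.Set.empty
      = PySem.Set.update PySem.Set.empty ((acc.filter (fun t => t.1 == k)).map (fun t => t.2.1)) := by
    rw [hfinal, pv_valA _ _ _ hcontA, hinitD]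
  have hB : resB.getD k PySem.Set.empty
      = PySem.Set.ofList ((acc.filter (fun t => t.1 == k)).map (fun t => t.2.1)) := by
    rw [hres, pv_getD_insert_loop
      (fun n => PySem.Set.ofList ((acc.filter (fun t => t.1 == n)).map (fun t => t.2.1))), if_pos hkd]
  rw [hA, hB]
  rw [PySem.Set.ofList_eq_foldl]
  rfl
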